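-- pv_equiv track=rewrite | github.com/phdomeraydin/LucasPaperCode | src/table3.py | lucas_upto
-- ===== SOURCE A (Python) =====
-- def lucas_upto(N: int):
--     """Generate Lucas numbers up to index N (L0=2, L1=1, Ln=Ln-1+Ln-2)."""
--     L = [0] * (N + 1)
--     if N >= 0:
--         L[0] = 2
--     if N >= 1:
--         L[1] = 1
--     for i in range(2, N + 1):
--         L[i] = L[i - 1] + L[i - 2]
--     return L
-- ===== SOURCE B (Python) =====
-- def lucas_upto(N: int):
--     """Generate Lucas numbers up to index N (L0=2, L1=1, Ln=Ln-1+Ln-2)."""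
--     def fib_pair(n):
--         # (F(n), F(n+1)) by fast doubling on the binary representation of n
--         if n == 0:
--             return (0, 1)
--         a, b = fib_pair(n >> 1)
--         c = a * (2 * b - a)
--         d = a * a + b * b
--         if n & 1:
--             return (d, c + d)
--         return (c, d)
--
--     out = []
--     for i in range(N + 1):
--         f, g = fib_pair(i)
--         out.append(2 * g - f)   # L_i = 2*F(i+1) - F(i)
--     return out
-- ===== Notes on version B (the rewrite author's own statement) =====
-- stated objective: alternative
-- what changed: instead of filling a pre-allocated array by the linear recurrence, B computes each Lucas number independently from the identity L_i = twice F(i+1) minus F(i), obtaining the Fibonacci pair by recursive fast doubling on the binary representation of i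
import Mathlib
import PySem

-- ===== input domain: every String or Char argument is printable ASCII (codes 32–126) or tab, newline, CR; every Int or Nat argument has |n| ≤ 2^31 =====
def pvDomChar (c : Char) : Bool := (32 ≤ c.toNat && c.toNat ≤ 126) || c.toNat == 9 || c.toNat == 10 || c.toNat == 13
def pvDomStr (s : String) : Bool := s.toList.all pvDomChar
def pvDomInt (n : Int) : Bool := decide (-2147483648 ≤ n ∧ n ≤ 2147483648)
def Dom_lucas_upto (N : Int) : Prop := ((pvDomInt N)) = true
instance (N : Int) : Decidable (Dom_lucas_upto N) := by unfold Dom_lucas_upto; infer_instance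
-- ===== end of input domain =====

-- B computes each Lucas number independently as L_i = 2*F(i+1) - F(i) with the
-- Fibonacci pair obtained by recursive fast doubling, instead of filling a
-- pre-allocated array by the linear recurrence (objective: alternative).

-- ===== PORT A =====
-- L[i] assignments / L[i-1], L[i-2] reads are always in range here, so pySetD/pyGetD are exact.
def lucas_upto (N : Int) : List Int :=
  let L0 : List Int := List.replicate (N + 1).toNat 0
  let L1 := if N ≥ 0 then PySem.List.pySetD L0 0 2 else L0
  let L2 := if N ≥ 1 then PySem.List.pySetD L1 1 1 else L1
  (PySem.List.pyRange 2 (N + 1) 1).foldl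
    (fun L i => PySem.List.pySetD L i
        (PySem.List.pyGetD L (i - 1) 0 + PySem.List.pyGetD L (i - 2) 0)) L2

-- ===== PORT B =====
-- fib_pair: (F(n), F(n+1)) by fast doubling; its argument is a loop index i ≥ 0,
-- so the Nat recursion (n >> 1 = n / 2, n & 1 = n % 2) is exact.
def fibPair (n : Nat) : Int × Int :=
  if h : n = 0 then (0, 1)
  else
    let p := fibPair (n / 2)
    let c := p.1 * (2 * p.2 - p.1)
    let d := p.1 * p.1 + p.2 * p.2
    if n % 2 = 1 then (d, c + d) else (c, d)
termination_by n
decreasing_by exact Nat.div_lt_self (Nat.pos_of_ne_zero h) (by norm_num)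

def lucas_upto_alt (N : Int) : List Int :=
  (PySem.List.pyRange 0 (N + 1) 1).foldl
    (fun out i =>
      let p := fibPair i.toNat
      out ++ [2 * p.2 - p.1]) []

-- ===== PRECONDITION & SPEC =====
def Spec_lucas_upto (N : Int) (out : List Int) : Prop := out = lucas_upto_alt N
instance (N : Int) (out : List Int) : Decidable (Spec_lucas_upto N out) := by unfold Spec_lucas_upto; infer_instance

-- ===== CLAIM (what is proved, stated in full; the proofs are below) =====
def Claim_equal_lucas_upto : Prop := ∀ (N : Int), Dom_lucas_upto N → Spec_lucas_upto N (lucas_upto N)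

-- ===== LEMMAS AND PROOFS =====

-- canonical Lucas sequence, used only inside the proofs
def luc : Nat → Int
  | 0 => 2
  | 1 => 1
  | n + 2 => luc (n + 1) + luc n

-- fast doubling really returns the Fibonacci pair
lemma fibPair_eq (n : Nat) : fibPair n = ((Nat.fib n : Int), (Nat.fib (n + 1) : Int)) := by
  induction n using Nat.strong_induction_on with
  | _ n ih =>
    rw [fibPair]
    by_cases h : n = 0
    · subst h; simp
    · rw [dif_neg h, ih (n / 2) (Nat.div_lt_self (Nat.pos_of_ne_zero h) (by norm_num))]
      set m := n / 2 with hm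
      have hfle : Nat.fib m ≤ 2 * Nat.fib (m + 1) :=
        le_trans Nat.fib_le_fib_succ (by omega)
      by_cases hp : n % 2 = 1
      · have hn : n = 2 * m + 1 := by omega
        simp only [hp, if_pos, Prod.mk.injEq]
        rw [hn, show 2 * m + 1 + 1 = 2 * m + 2 from rfl,
            Nat.fib_two_mul_add_one, Nat.fib_two_mul_add_two]
        constructor
        · push_cast; ring
        · push_cast; ring
      · have hn : n = 2 * m := by omega
        simp only [hp, if_neg, not_false_iff, Prod.mk.injEq]
        rw [hn, Nat.fib_two_mul, Nat.fib_two_mul_add_one]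
        constructor
        · push_cast [Nat.cast_sub hfle]; ring
        · push_cast; ring

-- L_n = 2*F(n+1) - F(n)
lemma luc_eq_fib : ∀ n : Nat, luc n = 2 * (Nat.fib (n + 1) : Int) - (Nat.fib n : Int) := by
  have key : ∀ n : Nat, luc n = 2 * (Nat.fib (n + 1) : Int) - (Nat.fib n : Int) ∧
      luc (n + 1) = 2 * (Nat.fib (n + 2) : Int) - (Nat.fib (n + 1) : Int) := by
    intro n
    induction n with
    | zero => simp [luc]
    | succ m ih =>
      refine ⟨ih.2, ?_⟩
      have hf : (Nat.fib (m + 2) : Int) = (Nat.fib m : Int) + (Nat.fib (m + 1) : Int) := by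
        rw [Nat.fib_add_two]; push_cast; ring
      have hf3 : (Nat.fib (m + 3) : Int) = (Nat.fib (m + 1) : Int) + (Nat.fib (m + 2) : Int) := by
        rw [show m + 3 = (m + 1) + 2 by omega, Nat.fib_add_two]; push_cast; ring
      show luc (m + 2) = 2 * (Nat.fib (m + 3) : Int) - (Nat.fib (m + 2) : Int)
      rw [luc, ih.1, ih.2, hf3, hf]
      ring
  exact fun n => (key n).1

lemma set_append_len {α : Type} (xs : List α) (y : α) (ys : List α) (v : α) :
    (xs ++ y :: ys).set xs.length v = xs ++ v :: ys := by
  induction xs with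
  | nil => simp
  | cons x xs ih => simp [ih]

lemma fillA (r : Nat) : ∀ (j : Nat), 2 ≤ j →
    (PySem.List.pyRange (j : Int) ((j : Int) + r) 1).foldl
      (fun L i => PySem.List.pySetD L i
          (PySem.List.pyGetD L (i - 1) 0 + PySem.List.pyGetD L (i - 2) 0))
      ((List.range j).map (fun i => luc i) ++ List.replicate r 0)
    = (List.range (j + r)).map (fun i => luc i) := by
  induction r with
  | zero =>
    intro j hj
    rw [PySem.List.pyRange_one_eq_nil (by omega)]
    simp
  | succ r ih =>
    intro j hj
    rw [PySem.List.pyRange_one_cons (by omega)]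
    simp only [List.foldl_cons]
    have hlen : ((List.range j).map (fun i => luc i)).length = j := by simp
    have hget1 : PySem.List.pyGetD
        ((List.range j).map (fun i => luc i) ++ List.replicate (r + 1) (0 : Int)) ((j : Int) - 1) 0
        = luc (j - 1) := by
      have hc : (j : Int) - 1 = ((j - 1 : Nat) : Int) := by omega
      rw [hc, PySem.List.pyGetD_natCast]
      rw [List.getD_eq_getElem?_getD, List.getElem?_append_left (by omega)]
      simp [List.getElem?_map, List.getElem?_range (show j - 1 < j by omega)]
    have hget2 : PySem.List.pyGetD
        ((List.range j).map (fun i => luc i) ++ List.replicate (r + 1) (0 : Int)) ((j : Int) - 2) 0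
        = luc (j - 2) := by
      have hc : (j : Int) - 2 = ((j - 2 : Nat) : Int) := by omega
      rw [hc, PySem.List.pyGetD_natCast]
      rw [List.getD_eq_getElem?_getD, List.getElem?_append_left (by omega)]
      simp [List.getElem?_map, List.getElem?_range (show j - 2 < j by omega)]
    rw [hget1, hget2]
    have hval : luc (j - 1) + luc (j - 2) = luc j := by
      obtain ⟨t, rfl⟩ : ∃ t, j = t + 2 := ⟨j - 2, by omega⟩
      show luc (t + 1) + luc t = _
      rw [luc]
    have hset : PySem.List.pySetD
        ((List.range j).map (fun i => luc i) ++ List.replicate (r + 1) (0 : Int)) (j : Int)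
        (luc (j - 1) + luc (j - 2))
        = (List.range (j + 1)).map (fun i => luc i) ++ List.replicate r 0 := by
      rw [PySem.List.pySetD_of_nonneg _ _ (by omega)]
      rw [List.replicate_succ, hval]
      have := set_append_len ((List.range j).map (fun i => luc i)) (0 : Int)
        (List.replicate r 0) (luc j)
      rw [hlen] at this
      rw [Int.toNat_natCast, this, List.range_succ]
      simp
    rw [hset]
    have hc1 : (j : Int) + 1 = ((j + 1 : Nat) : Int) := by omega
    have hc2 : (j : Int) + ((r : Nat) + 1 : Nat) = ((j + 1 : Nat) : Int) + (r : Nat) := by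
      push_cast; ring
    rw [hc2, hc1, ih (j + 1) (by omega)]
    rw [show j + 1 + r = j + (r + 1) from by omega]

lemma alt_eq (N : Int) : lucas_upto_alt N = (List.range (N + 1).toNat).map (fun i => luc i) := by
  unfold lucas_upto_alt
  rw [PySem.List.foldl_append_singleton_eq_map]
  rw [PySem.List.pyRange_one]
  simp only [List.map_map, List.nil_append, Int.sub_zero]
  apply List.map_congr_left
  intro k _
  simp only [Function.comp]
  rw [show ((0 : Int) + (k : Int)).toNat = k by omega]
  rw [fibPair_eq, luc_eq_fib]

-- ===== VERDICT (by name: the statement is the Claim_ definition above) =====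
theorem lucas_upto_spec : Claim_equal_lucas_upto := by
  intro N _
  show lucas_upto N = lucas_upto_alt N
  rw [alt_eq]
  rcases N with m | m
  · show lucas_upto (m : Int) = _
    cases m with
    | zero => decide
    | succ s =>
      show lucas_upto ((s : Int) + 1) = (List.range (((s : Int) + 1 + 1)).toNat).map (fun i => luc i)
      unfold lucas_upto
      simp only [ge_iff_le]
      rw [if_pos (by omega), if_pos (by omega)]
      have htn : ((s : Int) + 1 + 1).toNat = s + 2 := by omega
      rw [htn]
      have hL2 : PySem.List.pySetD
          (PySem.List.pySetD (List.replicate (s + 2) (0 : Int)) 0 2) 1 1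
          = (List.range 2).map (fun i => luc i) ++ List.replicate s 0 := by
        rw [PySem.List.pySetD_of_nonneg _ _ (by norm_num),
            PySem.List.pySetD_of_nonneg _ _ (by norm_num)]
        simp [List.replicate_succ, List.range_succ, luc]
      rw [hL2]
      have hfill := fillA s 2 (by omega)
      push_cast at hfill
      rw [show (s : Int) + 1 + 1 = (2 : Int) + ((s : Nat) : Int) by ring]
      rw [hfill, Nat.add_comm 2 s]
  · have hneg : Int.negSucc m < 0 := Int.negSucc_lt_zero m
    unfold lucas_upto
    simp only [ge_iff_le]
    rw [if_neg (by omega), if_neg (by omega)]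
    rw [PySem.List.pyRange_one_eq_nil (by omega)]
    have ht : (Int.negSucc m + 1).toNat = 0 := by omega
    rw [ht]
    simp
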